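-- pv_equiv track=rewrite | github.com/mrploch/ploch-common | scripts/generate-api-reference.py | count_params_in_signature
-- ===== SOURCE A (Python) =====
-- def count_params_in_signature(param_text: str) -> int:
--     if not param_text.strip():
--         return 0
--     depth = 0
--     count = 1
--     for char in param_text:
--         if char in "<([{":
--             depth += 1
--         elif char in ">)]}":
--             depth -= 1
--         elif char == "," and depth == 0:
--             count += 1
--     return count
-- ===== SOURCE B (Python) =====
-- def count_params_in_signature(param_text: str) -> int:
--     if not param_text.strip():
--         return 0
--     count = 1
--     for i, ch in enumerate(param_text):
--         if ch == ",":
--             prefix = param_text[:i]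
--             opens = sum(prefix.count(b) for b in "<([{")
--             closes = sum(prefix.count(b) for b in ">)]}")
--             if opens == closes:
--                 count += 1
--     return count
-- ===== Notes on version B (the rewrite author's own statement) =====
-- stated objective: alternative
-- what changed: B drops the running depth counter entirely: for each comma it decides top-levelness by comparing the number of opening vs closing brackets in the prefix before it (str.count over the slice), a per-comma balance test instead of A's single stateful depth/count loop.
import Mathlib
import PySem

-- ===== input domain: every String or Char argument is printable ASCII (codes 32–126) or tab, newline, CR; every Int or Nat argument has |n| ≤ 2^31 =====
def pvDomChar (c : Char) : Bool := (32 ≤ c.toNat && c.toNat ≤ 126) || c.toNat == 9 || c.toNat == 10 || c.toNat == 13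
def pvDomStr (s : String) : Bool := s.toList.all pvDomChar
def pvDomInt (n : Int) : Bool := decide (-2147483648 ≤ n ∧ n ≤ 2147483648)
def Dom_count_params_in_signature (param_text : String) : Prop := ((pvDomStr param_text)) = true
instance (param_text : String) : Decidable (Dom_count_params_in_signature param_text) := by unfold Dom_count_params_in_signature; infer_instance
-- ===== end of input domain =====

-- B drops A's running depth counter: each comma is judged top-level by comparing opening vs closing
-- bracket counts in the prefix before it (objective: alternative; same results, per-comma rescans).

-- ===== PORT A =====
def count_params_in_signature (param_text : String) : Int :=
  if PySem.Str.strip param_text = "" then 0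
  else
    (param_text.toList.foldl (fun (s : Int × Int) c =>
      if c ∈ ['<', '(', '[', '{'] then (s.1 + 1, s.2)
      else if c ∈ ['>', ')', ']', '}'] then (s.1 - 1, s.2)
      else if c = ',' ∧ s.1 = 0 then (s.1, s.2 + 1)
      else s) (0, 1)).2

-- ===== PORT B =====
-- sum(prefix.count(b) for b in "<([{") / ">)]}"
def cps_opens (l : List Char) : Int :=
  (l.count '<' : Int) + l.count '(' + l.count '[' + l.count '{'

def cps_closes (l : List Char) : Int :=
  (l.count '>' : Int) + l.count ')' + l.count ']' + l.count '}'

def count_params_in_signature_alt (param_text : String) : Int :=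
  if PySem.Str.strip param_text = "" then 0
  else
    (PySem.List.enumerate param_text.toList).foldl (fun (count : Int) p =>
      if p.2 = ',' then
        let pre := PySem.List.slice param_text.toList none (some p.1)
        if cps_opens pre = cps_closes pre then count + 1 else count
      else count) 1

-- ===== PRECONDITION & SPEC =====
def Spec_count_params_in_signature (param_text : String) (out : Int) : Prop := out = count_params_in_signature_alt param_text
instance (param_text : String) (out : Int) : Decidable (Spec_count_params_in_signature param_text out) := by unfold Spec_count_params_in_signature; infer_instance

-- ===== CLAIM (what is proved, stated in full; the proofs are below) =====
def Claim_equal_count_params_in_signature : Prop := ∀ (param_text : String), Dom_count_params_in_signature param_text → Spec_count_params_in_signature param_text (count_params_in_signature param_text)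

-- ===== LEMMAS AND PROOFS =====

-- A's depth after a prefix equals the bracket-count balance B recomputes.
theorem cps_depth_eq (l : List Char) : ∀ (d c : Int),
    (l.foldl (fun (s : Int × Int) ch =>
      if ch ∈ ['<', '(', '[', '{'] then (s.1 + 1, s.2)
      else if ch ∈ ['>', ')', ']', '}'] then (s.1 - 1, s.2)
      else if ch = ',' ∧ s.1 = 0 then (s.1, s.2 + 1)
      else s) (d, c)).1 = d + cps_opens l - cps_closes l := by
  induction l with
  | nil => intro d c; simp [cps_opens, cps_closes]
  | cons x xs ih =>
    intro d c
    simp only [List.foldl_cons]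
    by_cases h1 : x ∈ ['<', '(', '[', '{']
    · rw [if_pos h1, ih]
      simp only [List.mem_cons, List.not_mem_nil, or_false] at h1
      rcases h1 with h | h | h | h <;> subst h <;>
        simp [cps_opens, cps_closes] <;> ring_nf
    · by_cases h2 : x ∈ ['>', ')', ']', '}']
      · rw [if_neg h1, if_pos h2, ih]
        simp only [List.mem_cons, List.not_mem_nil, or_false] at h2
        rcases h2 with h | h | h | h <;> subst h <;>
          simp [cps_opens, cps_closes] <;> ring_nf
      · have h1' := h1; have h2' := h2
        simp only [List.mem_cons, List.not_mem_nil, or_false, not_or] at h1' h2'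
        have hcnt : cps_opens (x :: xs) = cps_opens xs ∧ cps_closes (x :: xs) = cps_closes xs := by
          constructor <;> simp [cps_opens, cps_closes,
            h1'.1, h1'.2.1, h1'.2.2.1, h1'.2.2.2,
            h2'.1, h2'.2.1, h2'.2.2.1, h2'.2.2.2]
        rw [if_neg h1, if_neg h2]
        by_cases h3 : x = ',' ∧ d = 0
        · rw [if_pos h3, ih, hcnt.1, hcnt.2]
        · rw [if_neg h3, ih, hcnt.1, hcnt.2]

theorem cps_enum_append (xs ys : List Char) : ∀ (s : Int),
    PySem.List.enumerate (xs ++ ys) s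
      = PySem.List.enumerate xs s ++ PySem.List.enumerate ys (s + xs.length) := by
  induction xs with
  | nil => intro s; simp [PySem.List.enumerate_nil]
  | cons x xs ih =>
    intro s
    simp only [List.cons_append, PySem.List.enumerate_cons, ih (s + 1), List.length_cons]
    congr 2
    push_cast
    ring

theorem cps_mem_enum_bound (xs : List Char) : ∀ (s i : Int) (c : Char),
    (i, c) ∈ PySem.List.enumerate xs s → s ≤ i ∧ i < s + xs.length := by
  induction xs with
  | nil => intro s i c h; simp [PySem.List.enumerate_nil] at h
  | cons x xs ih =>
    intro s i c h
    simp only [PySem.List.enumerate_cons, List.mem_cons] at h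
    rcases h with h | h
    · injection h with h1 _
      subst h1
      simp only [List.length_cons]
      push_cast
      omega
    · have := ih (s + 1) i c h
      simp only [List.length_cons]
      push_cast
      omega

theorem cps_foldl_congr {α β : Type} (l : List α) (f g : β → α → β)
    (h : ∀ (b : β) (a : α), a ∈ l → f b a = g b a) :
    ∀ (init : β), l.foldl f init = l.foldl g init := by
  induction l with
  | nil => intro init; rfl
  | cons x xs ih =>
    intro init
    simp only [List.foldl_cons]
    rw [h init x (by simp)]
    exact ih (fun b a ha => h b a (by simp [ha])) _

theorem cps_main (L : List Char) :
    (L.foldl (fun (s : Int × Int) ch =>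
      if ch ∈ ['<', '(', '[', '{'] then (s.1 + 1, s.2)
      else if ch ∈ ['>', ')', ']', '}'] then (s.1 - 1, s.2)
      else if ch = ',' ∧ s.1 = 0 then (s.1, s.2 + 1)
      else s) (0, 1)).2
    = (PySem.List.enumerate L).foldl (fun (count : Int) p =>
        if p.2 = ',' then
          let pre := PySem.List.slice L none (some p.1)
          if cps_opens pre = cps_closes pre then count + 1 else count
        else count) 1 := by
  induction L using List.reverseRecOn with
  | nil => simp [PySem.List.enumerate]
  | append_singleton M x ih =>
    rw [List.foldl_append]
    rw [show PySem.List.enumerate (M ++ [x]) = PySem.List.enumerate (M ++ [x]) 0 from rfl,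
        cps_enum_append M [x] 0, List.foldl_append]
    have hcongr : (PySem.List.enumerate M 0).foldl (fun (count : Int) p =>
        if p.2 = ',' then
          let pre := PySem.List.slice (M ++ [x]) none (some p.1)
          if cps_opens pre = cps_closes pre then count + 1 else count
        else count) 1
      = (PySem.List.enumerate M 0).foldl (fun (count : Int) p =>
        if p.2 = ',' then
          let pre := PySem.List.slice M none (some p.1)
          if cps_opens pre = cps_closes pre then count + 1 else count
        else count) 1 := by
      apply cps_foldl_congr
      intro b p hp
      obtain ⟨i, c⟩ := p
      have hb := cps_mem_enum_bound M 0 i c hp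
      have h0 : (0 : Int) ≤ i := hb.1
      have hlt : i < (M.length : Int) := by simpa using hb.2
      have hsl : PySem.List.slice (M ++ [x]) none (some i)
          = PySem.List.slice M none (some i) := by
        rw [PySem.List.slice_to _ h0, PySem.List.slice_to _ h0]
        exact List.take_append_of_le_length (by omega)
      simp only [hsl]
    rw [hcongr, ← ih]
    -- the last step
    set st := (M.foldl (fun (s : Int × Int) ch =>
      if ch ∈ ['<', '(', '[', '{'] then (s.1 + 1, s.2)
      else if ch ∈ ['>', ')', ']', '}'] then (s.1 - 1, s.2)
      else if ch = ',' ∧ s.1 = 0 then (s.1, s.2 + 1)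
      else s) ((0 : Int), (1 : Int))) with hst
    have hdepth : st.1 = cps_opens M - cps_closes M := by
      rw [hst, cps_depth_eq]; ring
    have hslM : PySem.List.slice (M ++ [x]) none (some ((0 : Int) + M.length))
        = M := by
      rw [PySem.List.slice_to _ (by positivity)]
      simp
    simp only [PySem.List.enumerate_nil, PySem.List.enumerate_cons, List.foldl_cons,
      List.foldl_nil, hslM]
    by_cases h1 : x ∈ ['<', '(', '[', '{']
    · have hx : ¬ (x = ',') := by rcases (by simpa using h1 : x = '<' ∨ x = '(' ∨ x = '[' ∨ x = '{') with h|h|h|h <;> subst h <;> decide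
      rw [if_pos h1, if_neg hx]
    · by_cases h2 : x ∈ ['>', ')', ']', '}']
      · have hx : ¬ (x = ',') := by rcases (by simpa using h2 : x = '>' ∨ x = ')' ∨ x = ']' ∨ x = '}') with h|h|h|h <;> subst h <;> decide
        rw [if_neg h1, if_pos h2, if_neg hx]
      · by_cases hx : x = ','
        · rw [if_neg h1, if_neg h2, if_pos hx]
          by_cases hd : st.1 = 0
          · rw [if_pos ⟨hx, hd⟩, if_pos (by omega)]
          · rw [if_neg (by tauto), if_neg (by omega)]
        · rw [if_neg h1, if_neg h2, if_neg (by tauto), if_neg hx]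

-- ===== VERDICT (by name: the statement is the Claim_ definition above) =====
theorem count_params_in_signature_spec : Claim_equal_count_params_in_signature := by
  intro s _
  unfold Spec_count_params_in_signature count_params_in_signature count_params_in_signature_alt
  by_cases h : PySem.Str.strip s = ""
  · simp [h]
  · simp only [h, ite_false]
    exact cps_main s.toList
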